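-- pv_equiv track=rewrite | github.com/brooot/Data_Distribution_with_Encoding | bit_distribution+GC_forward+90%pull/choose_data.py | getDegreeSququeGC
-- ===== SOURCE A (Python) =====
-- def getDegreeSququeGC(nsource):
--     time_queue = []
--     for i in range(5000):
--         if i < 70 * nsource:
--             time_queue.append(1)
--         elif i >= 70 * nsource and i < 120 * nsource:
--             time_queue.append(2)
--         elif i >= 120 * nsource and i < 200 * nsource:
--             time_queue.append(3)
--         elif i >= 200 * nsource and i < 270 * nsource:
--             time_queue.append(4)
--         elif i >= 270 * nsource and i < 350 * nsource:
--             time_queue.append(5)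
--         elif i >= 350 * nsource and i < 450 * nsource:
--             time_queue.append(6)
--         elif i >= 450 * nsource and i < 550 * nsource:
--             time_queue.append(7)
--         else:
--             time_queue.append(8)
--     return time_queue
-- ===== SOURCE B (Python) =====
-- def getDegreeSququeGC(nsource):
--     thresholds = [70 * nsource, 120 * nsource, 200 * nsource, 270 * nsource,
--                   350 * nsource, 450 * nsource, 550 * nsource]
--     return [1 + sum(i >= t for t in thresholds) for i in range(5000)]
-- ===== Notes on version B (the rewrite author's own statement) =====
-- stated objective: simpler
-- what changed: Replaces the if/elif cascade inside a grow-by-append loop with a threshold table built once and a per-index count of thresholds reached, emitted by a comprehension.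
import Mathlib
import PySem

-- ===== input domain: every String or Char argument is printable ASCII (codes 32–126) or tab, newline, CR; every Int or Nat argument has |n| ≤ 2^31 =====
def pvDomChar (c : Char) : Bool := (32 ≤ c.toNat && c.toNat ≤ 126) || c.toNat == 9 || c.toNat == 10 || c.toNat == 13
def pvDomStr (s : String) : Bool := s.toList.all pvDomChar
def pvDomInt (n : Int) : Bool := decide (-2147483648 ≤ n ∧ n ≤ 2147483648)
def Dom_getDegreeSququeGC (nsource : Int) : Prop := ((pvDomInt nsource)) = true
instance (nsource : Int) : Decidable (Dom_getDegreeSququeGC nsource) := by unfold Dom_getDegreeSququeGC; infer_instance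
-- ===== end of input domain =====

-- B replaces A's if/elif cascade with a threshold table and a per-index crossing count (simpler).

-- ===== PORT A =====
-- the cascade body of A's loop, branches in A's order
def pvCascadeGC (nsource i : Int) : Int :=
  if i < 70 * nsource then 1
  else if i ≥ 70 * nsource ∧ i < 120 * nsource then 2
  else if i ≥ 120 * nsource ∧ i < 200 * nsource then 3
  else if i ≥ 200 * nsource ∧ i < 270 * nsource then 4
  else if i ≥ 270 * nsource ∧ i < 350 * nsource then 5
  else if i ≥ 350 * nsource ∧ i < 450 * nsource then 6
  else if i ≥ 450 * nsource ∧ i < 550 * nsource then 7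
  else 8

def getDegreeSququeGC (nsource : Int) : List Int :=
  (PySem.List.pyRange 0 5000 1).foldl (fun time_queue i => time_queue ++ [pvCascadeGC nsource i]) []

-- ===== PORT B =====
def getDegreeSququeGC_alt (nsource : Int) : List Int :=
  let thresholds : List Int :=
    [70 * nsource, 120 * nsource, 200 * nsource, 270 * nsource,
     350 * nsource, 450 * nsource, 550 * nsource]
  (PySem.List.pyRange 0 5000 1).map
    (fun i => 1 + (thresholds.map (fun t => if i ≥ t then (1 : Int) else 0)).sum)

-- ===== PRECONDITION & SPEC =====
def Spec_getDegreeSququeGC (nsource : Int) (out : List Int) : Prop := out = getDegreeSququeGC_alt nsource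
instance (nsource : Int) (out : List Int) : Decidable (Spec_getDegreeSququeGC nsource out) := by unfold Spec_getDegreeSququeGC; infer_instance

-- ===== CLAIM (what is proved, stated in full; the proofs are below) =====
def Claim_equal_getDegreeSququeGC : Prop := ∀ (nsource : Int), Dom_getDegreeSququeGC nsource → Spec_getDegreeSququeGC nsource (getDegreeSququeGC nsource)

-- ===== LEMMAS AND PROOFS =====

-- pointwise: the cascade's value equals 1 plus the number of thresholds reached
set_option maxHeartbeats 1000000 in
theorem pvCascadeGC_eq_count (nsource i : Int) (hi : 0 ≤ i) :
    pvCascadeGC nsource i =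
      1 + (([70 * nsource, 120 * nsource, 200 * nsource, 270 * nsource,
             350 * nsource, 450 * nsource, 550 * nsource].map
             (fun t => if i ≥ t then (1 : Int) else 0)).sum) := by
  simp only [pvCascadeGC, List.map, List.sum_cons, List.sum_nil]
  split_ifs <;> omega

-- ===== VERDICT (by name: the statement is the Claim_ definition above) =====
set_option maxRecDepth 8192 in
theorem getDegreeSququeGC_spec : Claim_equal_getDegreeSququeGC := by
  intro nsource _
  unfold Spec_getDegreeSququeGC getDegreeSququeGC getDegreeSququeGC_alt
  rw [PySem.List.foldl_append_singleton_eq_map]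
  refine List.map_congr_left (fun i hi => pvCascadeGC_eq_count nsource i ?_)
  have := (PySem.List.mem_pyRange_one.mp hi).1
  omega
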